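-- pv_equiv track=rewrite | github.com/baxkspace/algorithm-Xplosion | Programmers/문자열_나누기/driedfish-and-cheese/solution.py | solution
-- ===== SOURCE A (Python) =====
-- def solution(s):
--     answer = 0
--     i=0
--     cnt_1=0
--     cnt_2=0
--     for i in s:
--         if(cnt_1==cnt_2):
--             cnt_1=0
--             cnt_2=0
--             answer +=1
--             check = i
--         if(check==i):
--             cnt_1 += 1
--         else:
--             cnt_2 += 1
--     return answer
-- ===== SOURCE B (Python) =====
-- def solution(s):
--     # stage 1: run-length encode the string
--     runs = []
--     for c in s:
--         if runs and runs[-1][0] == c: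
--             runs[-1][1] += 1
--         else:
--             runs.append([c, 1])
--     # stage 2: walk the runs, consuming each whole run with balance arithmetic
--     answer = 0
--     bal = 0          # 0 = no open segment; else chars still needed to close it
--     x = None         # head character of the open segment
--     for c, ln in runs:
--         if bal == 0:          # open a new segment headed by this run's char
--             answer += 1
--             x = c
--             bal = ln
--         elif c == x:          # a run of the head char: balance grows by its length
--             bal += ln
--         elif ln < bal:        # a short foreign run: balance shrinks, segment stays open
--             bal -= ln
--         else:                 # segment closes inside this run; remainder opens the next one
--             rem = ln - bal
--             if rem:
--                 answer += 1
--                 x = c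
--             bal = rem
--     return answer
-- ===== Notes on version B (the rewrite author's own statement) =====
-- stated objective: alternative
-- what changed: Replaced A's per-character match/mismatch tallying by a two-stage algorithm: run-length encode the string, then segment it by arithmetic on whole runs (each run consumed in O(1) by adding/subtracting its length from the open segment's balance).
import Mathlib
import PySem

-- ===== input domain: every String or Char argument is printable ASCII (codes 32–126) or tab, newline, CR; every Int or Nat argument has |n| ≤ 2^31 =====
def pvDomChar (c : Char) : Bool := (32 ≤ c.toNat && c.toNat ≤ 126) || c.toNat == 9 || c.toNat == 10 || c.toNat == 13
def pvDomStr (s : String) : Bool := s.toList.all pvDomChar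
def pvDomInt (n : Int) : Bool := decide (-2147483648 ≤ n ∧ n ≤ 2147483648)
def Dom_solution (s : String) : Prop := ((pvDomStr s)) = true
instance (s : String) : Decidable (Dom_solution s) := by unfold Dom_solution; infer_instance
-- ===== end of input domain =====

-- B replaces A's per-character match/mismatch tallying by a two-stage algorithm:
-- run-length encode the string, then cut segments by balance ARITHMETIC on whole runs
-- (each run consumed in one step); same asymptotic cost ("alternative").

-- ===== PORT A =====
-- one step of A's for-loop: state (answer, cnt_1, cnt_2, check); check is None before first assignment
def solutionStep (st : Int × Int × Int × Option Char) (c : Char) : Int × Int × Int × Option Char :=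
  let (ans, c1, c2, chk) := st
  let (ans, c1, c2, chk) :=
    if c1 == c2 then (ans + 1, (0 : Int), (0 : Int), some c) else (ans, c1, c2, chk)
  if chk == some c then (ans, c1 + 1, c2, chk) else (ans, c1, c2 + 1, chk)

def solution (s : String) : Int :=
  (s.toList.foldl solutionStep ((0 : Int), (0 : Int), (0 : Int), (none : Option Char))).1

-- ===== PORT B =====
-- B stage 1 (run-length encoding): python appends at the end and bumps runs[-1];
-- ported with the accumulator REVERSED (head = python's runs[-1]), reversed once at the end
def runsStep (runs : List (Char × Int)) (c : Char) : List (Char × Int) :=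
  match runs with
  | (c', k) :: rest => if c' = c then (c', k + 1) :: rest else (c, 1) :: (c', k) :: rest
  | [] => [(c, 1)]

-- B stage 2: one step of B's for-loop over the runs; state (answer, bal, x); x is None before the first segment opens
def walkStep (st : Int × Int × Option Char) (r : Char × Int) : Int × Int × Option Char :=
  let (ans, bal, x) := st
  let (c, ln) := r
  if bal = 0 then (ans + 1, ln, some c)
  else if some c = x then (ans, bal + ln, x)
  else if ln < bal then (ans, bal - ln, x)
  else
    let rem := ln - bal
    if rem ≠ 0 then (ans + 1, rem, some c) else (ans, rem, x)

def solution_alt (s : String) : Int :=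
  let runs := (s.toList.foldl runsStep []).reverse
  (runs.foldl walkStep ((0 : Int), (0 : Int), (none : Option Char))).1

-- ===== PRECONDITION & SPEC =====
def Spec_solution (s : String) (out : Int) : Prop := out = solution_alt s
instance (s : String) (out : Int) : Decidable (Spec_solution s out) := by unfold Spec_solution; infer_instance

-- ===== CLAIM (what is proved, stated in full; the proofs are below) =====
def Claim_equal_solution : Prop := ∀ (s : String), Dom_solution s → Spec_solution s (solution s)

-- ===== LEMMAS AND PROOFS =====

-- reference segmentation, used only by the proofs: refInner consumes one segment's tail
-- (balance bal, head x), returning the remainder; refSegs counts the segments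
def refInner (x : Char) : List Char → Int → List Char
  | [], _ => []
  | c :: r, bal =>
      let b := bal + (if c = x then 1 else -1)
      if b = 0 then r else refInner x r b

theorem refInner_cons (x c : Char) (rest : List Char) (bal : Int) :
    refInner x (c :: rest) bal =
      if bal + (if c = x then 1 else -1) = 0 then rest
      else refInner x rest (bal + (if c = x then 1 else -1)) := rfl

theorem refInner_cons_head (x : Char) (rest : List Char) (bal : Int) :
    refInner x (x :: rest) bal =
      if bal + 1 = 0 then rest else refInner x rest (bal + 1) := by
  rw [refInner_cons]; simp

theorem refInner_cons_other (x c : Char) (h : c ≠ x) (rest : List Char) (bal : Int) :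
    refInner x (c :: rest) bal =
      if bal + -1 = 0 then rest else refInner x rest (bal + -1) := by
  rw [refInner_cons]; simp [h]

theorem refInner_length_le (x : Char) :
    ∀ (l : List Char) (bal : Int), (refInner x l bal).length ≤ l.length := by
  intro l
  induction l with
  | nil => intro bal; simp [refInner]
  | cons c rest ih =>
      intro bal
      rw [refInner_cons]
      split
      all_goals split
      all_goals first
        | exact Nat.le_succ _
        | exact le_trans (ih _) (Nat.le_succ _)

def refSegs : List Char → Int
  | [] => 0
  | x :: rest => 1 + refSegs (refInner x rest 1)
termination_by l => l.length
decreasing_by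
  exact Nat.lt_succ_of_le (refInner_length_le _ _ _)

def decodeRuns (rs : List (Char × Int)) : List Char :=
  rs.flatMap (fun r => List.replicate r.2.toNat r.1)

-- A-side invariant: from a balanced state the remaining fold adds the segment count of the
-- remaining list; from a mid-segment state with positive balance it adds the segment count
-- of the remainder left by refInner
theorem solution_fold_invariant :
    ∀ (l : List Char),
      (∀ (ans c : Int) (chk : Option Char),
        (l.foldl solutionStep (ans, c, c, chk)).1 = ans + refSegs l) ∧
      (∀ (ans c1 c2 : Int) (x : Char), 1 ≤ c1 - c2 →
        (l.foldl solutionStep (ans, c1, c2, some x)).1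
          = ans + refSegs (refInner x l (c1 - c2))) := by
  intro l
  induction l with
  | nil => simp [refSegs, refInner]
  | cons c rest ih =>
      constructor
      · intro ans cc chk
        have h1 : solutionStep (ans, cc, cc, chk) c = (ans + 1, 1, 0, some c) := by
          simp [solutionStep]
        rw [List.foldl_cons, h1, ih.2 (ans + 1) 1 0 c (by norm_num)]
        have h10 : (1 : Int) - 0 = 1 := by norm_num
        rw [h10]
        simp only [refSegs]
        ring
      · intro ans c1 c2 x hpos
        have hb : (c1 == c2) = false := by simp; omega
        by_cases hc : c = x
        · subst hc
          have h1 : solutionStep (ans, c1, c2, some c) c = (ans, c1 + 1, c2, some c) := by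
            simp [solutionStep, hb]
          rw [List.foldl_cons, h1, ih.2 ans (c1 + 1) c2 c (by omega)]
          have h2 : c1 + 1 - c2 = c1 - c2 + 1 := by ring
          have hr : refInner c (c :: rest) (c1 - c2) = refInner c rest (c1 - c2 + 1) := by
            rw [refInner_cons_head, if_neg (by omega)]
          rw [h2, hr]
        · have h1 : solutionStep (ans, c1, c2, some x) c = (ans, c1, c2 + 1, some x) := by
            have : (some x == some c) = false := by simp [Ne.symm hc]
            simp [solutionStep, hb, this]
          rw [List.foldl_cons, h1]
          by_cases heq : c1 - c2 = 1
          · have h2 : c1 = c2 + 1 := by omega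
            rw [h2, ih.1 ans (c2 + 1) (some x)]
            have hr : refInner x (c :: rest) (c2 + 1 - c2) = rest := by
              rw [refInner_cons_other x c hc, if_pos (by omega)]
            rw [hr]
          · rw [ih.2 ans c1 (c2 + 1) x (by omega)]
            have h3 : c1 - (c2 + 1) = c1 - c2 - 1 := by ring
            have hr : refInner x (c :: rest) (c1 - c2) = refInner x rest (c1 - c2 - 1) := by
              rw [refInner_cons_other x c hc, if_neg (by omega)]
              congr 1
            rw [h3, hr]

-- a run of the head char only raises the balance
theorem refInner_replicate_head (x : Char) :
    ∀ (k : Nat) (d : List Char) (bal : Int), 1 ≤ bal →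
      refInner x (List.replicate k x ++ d) bal = refInner x d (bal + k) := by
  intro k
  induction k with
  | zero => intro d bal _; simp
  | succ m ih =>
      intro d bal hb
      rw [List.replicate_succ, List.cons_append, refInner_cons_head,
        if_neg (by omega), ih d (bal + 1) (by omega)]
      congr 1
      push_cast
      ring

-- a foreign run lowers the balance; if long enough, the segment cuts inside it
theorem refInner_replicate_other (x c : Char) (hne : c ≠ x) :
    ∀ (k : Nat) (d : List Char) (bal : Int), 1 ≤ bal →
      refInner x (List.replicate k c ++ d) bal =
        if (k : Int) < bal then refInner x d (bal - k)
        else List.replicate (k - bal.toNat) c ++ d := by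
  intro k
  induction k with
  | zero =>
      intro d bal hb
      rw [if_pos (by exact_mod_cast hb.trans_lt' (by norm_num))]
      simp
  | succ m ih =>
      intro d bal hb
      rw [List.replicate_succ, List.cons_append, refInner_cons_other x c hne]
      by_cases h0 : bal + -1 = 0
      · rw [if_pos h0]
        have hb1 : bal = 1 := by omega
        rw [if_neg (by push_cast; omega)]
        have : m + 1 - bal.toNat = m := by omega
        rw [this]
      · rw [if_neg h0, ih d (bal + -1) (by omega)]
        by_cases hm : (m : Int) < bal + -1
        · rw [if_pos hm, if_pos (by push_cast; omega)]
          congr 1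
          push_cast
          ring
        · rw [if_neg hm, if_neg (by push_cast; omega)]
          congr 2
          omega

-- stage-1 invariant: the reversed accumulator's runs stay positive and decode back to the input
theorem runs_fold_spec :
    ∀ (l : List Char) (acc : List (Char × Int)), (∀ r ∈ acc, 1 ≤ r.2) →
      (∀ r ∈ l.foldl runsStep acc, 1 ≤ r.2) ∧
      decodeRuns ((l.foldl runsStep acc).reverse) = decodeRuns acc.reverse ++ l := by
  intro l
  induction l with
  | nil => intro acc hacc; simpa [decodeRuns] using hacc
  | cons c rest ih =>
      intro acc hacc
      rw [List.foldl_cons]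
      have hstep : (∀ r ∈ runsStep acc c, 1 ≤ r.2) ∧
          decodeRuns ((runsStep acc c).reverse) = decodeRuns acc.reverse ++ [c] := by
        match acc, hacc with
        | [], _ => simp [runsStep, decodeRuns]
        | (c', k) :: tail, hacc =>
            have hk : 1 ≤ k := hacc (c', k) (by simp)
            by_cases hcc : c' = c
            · subst hcc
              constructor
              · intro r hr
                simp only [runsStep, if_true] at hr
                rcases List.mem_cons.1 hr with h | h
                · subst h; simp; omega
                · exact hacc r (List.mem_cons_of_mem _ h)
              · simp only [runsStep, if_true, decodeRuns, List.reverse_cons,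
                  List.flatMap_append, List.flatMap_cons, List.flatMap_nil]
                have : (k + 1).toNat = k.toNat + 1 := by omega
                rw [this, List.replicate_succ' (n := k.toNat)]
                simp
            · constructor
              · intro r hr
                simp only [runsStep, if_neg hcc] at hr
                rcases List.mem_cons.1 hr with h | h
                · subst h; simp
                · exact hacc r h
              · simp only [runsStep, if_neg hcc, decodeRuns, List.reverse_cons,
                  List.flatMap_append, List.flatMap_cons, List.flatMap_nil]
                simp
      obtain ⟨h1, h2⟩ := ih (runsStep acc c) hstep.1
      refine ⟨h1, ?_⟩
      rw [h2, hstep.2]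
      simp

-- stage-2 invariant: with no open segment the walk adds the segment count of the decoded
-- remainder; with an open segment (head x, balance bal ≥ 1) it adds the segment count of
-- what refInner leaves of it
theorem walk_fold_invariant :
    ∀ (runs : List (Char × Int)), (∀ r ∈ runs, 1 ≤ r.2) →
      (∀ (ans : Int) (x : Option Char),
        (runs.foldl walkStep (ans, 0, x)).1 = ans + refSegs (decodeRuns runs)) ∧
      (∀ (ans bal : Int) (x : Char), 1 ≤ bal →
        (runs.foldl walkStep (ans, bal, some x)).1
          = ans + refSegs (refInner x (decodeRuns runs) bal)) := by
  intro runs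
  induction runs with
  | nil => intro _; simp [decodeRuns, refSegs, refInner]
  | cons r rest ih =>
      intro hpos
      obtain ⟨c, ln⟩ := r
      have hln : 1 ≤ ln := hpos (c, ln) (by simp)
      have hrest := ih (fun r hr => hpos r (List.mem_cons_of_mem _ hr))
      have hdec : decodeRuns ((c, ln) :: rest)
          = List.replicate ln.toNat c ++ decodeRuns rest := by
        simp [decodeRuns]
      constructor
      · intro ans x
        have h1 : walkStep (ans, 0, x) (c, ln) = (ans + 1, ln, some c) := by
          simp [walkStep]
        rw [List.foldl_cons, h1, hrest.2 (ans + 1) ln c hln, hdec]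
        have hrep : List.replicate ln.toNat c = c :: List.replicate (ln.toNat - 1) c := by
          have : ln.toNat = (ln.toNat - 1) + 1 := by omega
          rw [this, List.replicate_succ]
          simp
        rw [hrep, List.cons_append]
        rw [refSegs]
        rw [refInner_replicate_head c (ln.toNat - 1) (decodeRuns rest) 1 (by norm_num)]
        have : (1 : Int) + (ln.toNat - 1 : Nat) = ln := by omega
        rw [this]
        ring
      · intro ans bal x hbal
        rw [List.foldl_cons, hdec]
        by_cases hcx : c = x
        · subst hcx
          have h1 : walkStep (ans, bal, some c) (c, ln) = (ans, bal + ln, some c) := by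
            simp [walkStep]
            intro h; omega
          rw [h1, hrest.2 ans (bal + ln) c (by omega),
            refInner_replicate_head c ln.toNat (decodeRuns rest) bal hbal]
          congr 3
          omega
        · rw [refInner_replicate_other x c hcx ln.toNat (decodeRuns rest) bal hbal]
          by_cases hlt : ln < bal
          · have h1 : walkStep (ans, bal, some x) (c, ln) = (ans, bal - ln, some x) := by
              simp [walkStep, hcx, hlt]
              omega
            rw [h1, hrest.2 ans (bal - ln) x (by omega), if_pos (by omega)]
            congr 3
            omega
          · rw [if_neg (by omega)]
            have hrem : ln.toNat - bal.toNat = (ln - bal).toNat := by omega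
            by_cases h0 : ln - bal = 0
            · have h1 : walkStep (ans, bal, some x) (c, ln) = (ans, ln - bal, some x) := by
                simp [walkStep, hcx, hlt, h0]
                omega
              rw [h1, h0, hrest.1 ans (some x), hrem, h0]
              simp
            · have h1 : walkStep (ans, bal, some x) (c, ln) = (ans + 1, ln - bal, some c) := by
                simp [walkStep, hcx, hlt, h0]
                omega
              rw [h1, hrest.2 (ans + 1) (ln - bal) c (by omega), hrem]
              have hrepl : List.replicate (ln - bal).toNat c
                  = c :: List.replicate ((ln - bal).toNat - 1) c := by
                rw [show (ln - bal).toNat = ((ln - bal).toNat - 1) + 1 from by omega,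
                  List.replicate_succ]
                simp
              rw [hrepl, List.cons_append, refSegs,
                refInner_replicate_head c ((ln - bal).toNat - 1) (decodeRuns rest) 1 (by norm_num)]
              have : (1 : Int) + ((ln - bal).toNat - 1 : Nat) = ln - bal := by omega
              rw [this]
              ring

-- ===== VERDICT (by name: the statement is the Claim_ definition above) =====
theorem solution_spec : Claim_equal_solution := by
  intro s _
  unfold Spec_solution solution solution_alt
  obtain ⟨hpos, hdec⟩ := runs_fold_spec s.toList [] (by simp)
  have hposrev : ∀ r ∈ (s.toList.foldl runsStep []).reverse, 1 ≤ r.2 := by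
    intro r hr; exact hpos r (List.mem_reverse.1 hr)
  rw [(solution_fold_invariant s.toList).1 0 0 none,
    (walk_fold_invariant _ hposrev).1 0 none]
  simp only [decodeRuns] at hdec ⊢
  rw [hdec]
  simp
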